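-- pv_equiv track=rewrite | github.com/ThiruvarankanM/Rebuilding-Aider-with-Jac-OSP | aider/diffs.py | optimize_diff_context
-- ===== SOURCE A (Python) =====
-- def optimize_diff_context(diff_text, max_tokens=1000):
--     """Optimize diff for LLM token usage by reducing context"""
--     lines = diff_text.split('\n')
--     if len(lines) <= max_tokens // 10:  # Rough token estimation
--         return diff_text
--
--     # Keep header and reduce context lines
--     header_lines = []
--     diff_lines = []
--
--     for line in lines:
--         if line.startswith('---') or line.startswith('+++') or line.startswith('@@'):
--             header_lines.append(line)
--         else:
--             diff_lines.append(line)
--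
--     # Keep essential changes, reduce context
--     essential_lines = [line for line in diff_lines if line.startswith('+') or line.startswith('-')]
--     context_lines = [line for line in diff_lines if not (line.startswith('+') or line.startswith('-'))]
--
--     # Limit context lines
--     max_context = min(len(context_lines), (max_tokens // 20))
--     limited_context = context_lines[:max_context//2] + context_lines[-max_context//2:]
--
--     return '\n'.join(header_lines + essential_lines + limited_context)
-- ===== SOURCE B (Python) =====
-- def optimize_diff_context(diff_text, max_tokens=1000):
--     """Optimize diff for LLM token usage by reducing context"""
--     lines = diff_text.split('\n')
--     if len(lines) <= max_tokens // 10:  # Rough token estimation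
--         return diff_text
--
--     # A stable sort by category groups the lines: headers first, then +/-
--     # changes, then context, each group keeping its original relative order.
--     def rank(line):
--         if line.startswith(('---', '+++', '@@')):
--             return 0
--         if line.startswith(('+', '-')):
--             return 1
--         return 2
--
--     ordered = sorted(lines, key=rank)
--     n_ctx = sum(1 for l in ordered if rank(l) == 2)
--     kept = ordered[:len(ordered) - n_ctx]   # headers + changes
--     ctx = ordered[len(ordered) - n_ctx:]    # context lines, in order
--     mc = min(n_ctx, max_tokens // 20)
--     return '\n'.join(kept + ctx[:mc // 2] + ctx[-(mc - mc // 2):])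
-- ===== Notes on version B (the rewrite author's own statement) =====
-- stated objective: alternative
-- what changed: Instead of A's three filtering passes that build header/essential/context lists and concatenate them, B does a single stable sort of all lines keyed by a 3-valued category rank (header=0, change=1, context=2), which groups the categories while preserving order, then splits off the context suffix by a rank-2 count and trims its middle with one symmetric slice.
import Mathlib
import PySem

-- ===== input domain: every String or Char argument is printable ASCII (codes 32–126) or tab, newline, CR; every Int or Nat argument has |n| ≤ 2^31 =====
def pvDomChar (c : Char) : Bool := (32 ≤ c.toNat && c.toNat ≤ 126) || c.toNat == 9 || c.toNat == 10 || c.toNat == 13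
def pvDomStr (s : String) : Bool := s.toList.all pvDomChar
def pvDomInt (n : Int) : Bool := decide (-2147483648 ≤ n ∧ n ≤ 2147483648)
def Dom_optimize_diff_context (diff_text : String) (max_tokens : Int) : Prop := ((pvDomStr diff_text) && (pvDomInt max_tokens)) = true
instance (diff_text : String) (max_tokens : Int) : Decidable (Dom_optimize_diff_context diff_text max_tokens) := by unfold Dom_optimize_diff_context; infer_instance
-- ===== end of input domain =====

-- B replaces A's three filtering passes with one stable sort by a 3-valued category rank
-- plus a rank-2 count and a symmetric middle trim; same return value (alternative, not faster).

-- shared prefix predicates (the literal startswith tests of both Pythons)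
def pvIsHeader (line : String) : Bool :=
  PySem.Str.startswith line "---" || PySem.Str.startswith line "+++" || PySem.Str.startswith line "@@"
def pvIsSign (line : String) : Bool :=
  PySem.Str.startswith line "+" || PySem.Str.startswith line "-"

-- ===== PORT A =====
def optimize_diff_context (diff_text : String) (max_tokens : Int) : String :=
  let lines := (PySem.Str.split? diff_text "\n").getD []
  if (lines.length : Int) ≤ PySem.Int.floordiv max_tokens 10 then diff_text
  else
    -- for line in lines: header_lines / diff_lines
    let hd := lines.foldl
      (fun (acc : List String × List String) line =>
        if pvIsHeader line then (acc.1 ++ [line], acc.2) else (acc.1, acc.2 ++ [line]))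
      ([], [])
    let header_lines := hd.1
    let diff_lines := hd.2
    let essential_lines := diff_lines.filter (fun line => pvIsSign line)
    let context_lines := diff_lines.filter (fun line => !(pvIsSign line))
    let max_context := min (context_lines.length : Int) (PySem.Int.floordiv max_tokens 20)
    -- context_lines[:max_context//2] + context_lines[-max_context//2:]
    let limited_context :=
      PySem.List.slice context_lines none (some (PySem.Int.floordiv max_context 2)) ++
      PySem.List.slice context_lines (some (PySem.Int.floordiv (-max_context) 2)) none
    PySem.Str.join "\n" (header_lines ++ essential_lines ++ limited_context)

-- ===== PORT B =====
-- B's category key: 0 = header, 1 = +/- change, 2 = context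
def pvRank (line : String) : Int :=
  if pvIsHeader line then 0 else if pvIsSign line then 1 else 2

def optimize_diff_context_alt (diff_text : String) (max_tokens : Int) : String :=
  let lines := (PySem.Str.split? diff_text "\n").getD []
  if (lines.length : Int) ≤ PySem.Int.floordiv max_tokens 10 then diff_text
  else
    -- ordered = sorted(lines, key=rank): stable, groups the three categories
    let ordered := PySem.List.sorted lines pvRank
    -- n_ctx = sum(1 for l in ordered if rank(l) == 2)
    let n_ctx : Int := (ordered.countP (fun l => pvRank l == 2) : Int)
    let kept := PySem.List.slice ordered none (some ((ordered.length : Int) - n_ctx))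
    let ctx := PySem.List.slice ordered (some ((ordered.length : Int) - n_ctx)) none
    let mc := min n_ctx (PySem.Int.floordiv max_tokens 20)
    PySem.Str.join "\n"
      (kept ++ PySem.List.slice ctx none (some (PySem.Int.floordiv mc 2)) ++
        PySem.List.slice ctx (some (-(mc - PySem.Int.floordiv mc 2))) none)

-- ===== PRECONDITION & SPEC =====
def Spec_optimize_diff_context (diff_text : String) (max_tokens : Int) (out : String) : Prop := out = optimize_diff_context_alt diff_text max_tokens
instance (diff_text : String) (max_tokens : Int) (out : String) : Decidable (Spec_optimize_diff_context diff_text max_tokens out) := by unfold Spec_optimize_diff_context; infer_instance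

-- ===== CLAIM (what is proved, stated in full; the proofs are below) =====
def Claim_equal_optimize_diff_context : Prop := ∀ (diff_text : String) (max_tokens : Int), Dom_optimize_diff_context diff_text max_tokens → Spec_optimize_diff_context diff_text max_tokens (optimize_diff_context diff_text max_tokens)

-- ===== LEMMAS AND PROOFS =====

-- the three buckets, as filters over the original line order
def pvF0 (l : String) : Bool := pvIsHeader l
def pvF1 (l : String) : Bool := !pvIsHeader l && pvIsSign l
def pvF2 (l : String) : Bool := !pvIsHeader l && !pvIsSign l

-- insertBy skips a prefix it is not to be inserted before
theorem pvInsertBy_skip (x : String) (as bs : List String)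
    (h : ∀ y ∈ as, ¬ pvRank x < pvRank y) :
    PySem.List.insertBy (fun a b => decide (pvRank a < pvRank b)) x (as ++ bs)
    = as ++ PySem.List.insertBy (fun a b => decide (pvRank a < pvRank b)) x bs := by
  induction as with
  | nil => simp
  | cons a as ih =>
    have ha : ¬ pvRank x < pvRank a := h a (by simp)
    simp [PySem.List.insertBy, ha, ih (fun y hy => h y (by simp [hy]))]

-- insertBy puts x in front when it is before every element
theorem pvInsertBy_front (x : String) (bs : List String)
    (h : ∀ y ∈ bs, pvRank x < pvRank y) :
    PySem.List.insertBy (fun a b => decide (pvRank a < pvRank b)) x bs = x :: bs := by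
  cases bs with
  | nil => simp [PySem.List.insertBy]
  | cons b bs => simp [PySem.List.insertBy, h b (by simp)]

-- the stable insertion sort by pvRank routes every line to the end of its bucket
theorem pvBucketFold (lines b0 b1 b2 : List String)
    (h0 : ∀ l ∈ b0, pvRank l = 0) (h1 : ∀ l ∈ b1, pvRank l = 1) (h2 : ∀ l ∈ b2, pvRank l = 2) :
    lines.foldl
      (fun acc x => PySem.List.insertBy (fun a b => decide (pvRank a < pvRank b)) x acc)
      (b0 ++ b1 ++ b2)
    = (b0 ++ lines.filter pvF0) ++ (b1 ++ lines.filter pvF1) ++ (b2 ++ lines.filter pvF2) := by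
  induction lines generalizing b0 b1 b2 with
  | nil => simp
  | cons x xs ih =>
    by_cases hx0 : pvIsHeader x
    · have hr : pvRank x = 0 := by simp [pvRank, hx0]
      have step :
          PySem.List.insertBy (fun a b => decide (pvRank a < pvRank b)) x (b0 ++ b1 ++ b2)
          = (b0 ++ [x]) ++ b1 ++ b2 := by
        rw [List.append_assoc, pvInsertBy_skip x b0 (b1 ++ b2)
              (fun y hy => by rw [hr, h0 y hy]; omega),
            pvInsertBy_front x (b1 ++ b2)
              (fun y hy => by
                rcases List.mem_append.mp hy with hy | hy
                · rw [hr, h1 y hy]; omega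
                · rw [hr, h2 y hy]; omega)]
        simp
      rw [List.foldl_cons, step,
          ih (b0 ++ [x]) b1 b2
            (fun l hl => by rcases List.mem_append.mp hl with hl | hl
                            · exact h0 l hl
                            · simp at hl; subst hl; exact hr)
            h1 h2]
      simp [pvF0, pvF1, pvF2, hx0]
    · by_cases hx1 : pvIsSign x
      · have hr : pvRank x = 1 := by simp [pvRank, hx0, hx1]
        have step :
            PySem.List.insertBy (fun a b => decide (pvRank a < pvRank b)) x (b0 ++ b1 ++ b2)
            = b0 ++ (b1 ++ [x]) ++ b2 := by
          rw [pvInsertBy_skip x (b0 ++ b1) b2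
                (fun y hy => by
                  rcases List.mem_append.mp hy with hy | hy
                  · rw [hr, h0 y hy]; omega
                  · rw [hr, h1 y hy]; omega),
              pvInsertBy_front x b2 (fun y hy => by rw [hr, h2 y hy]; omega)]
          simp
        rw [List.foldl_cons, step,
            ih b0 (b1 ++ [x]) b2 h0
              (fun l hl => by rcases List.mem_append.mp hl with hl | hl
                              · exact h1 l hl
                              · simp at hl; subst hl; exact hr)
              h2]
        simp [pvF0, pvF1, pvF2, hx0, hx1]
      · have hr : pvRank x = 2 := by simp [pvRank, hx0, hx1]
        have step :
            PySem.List.insertBy (fun a b => decide (pvRank a < pvRank b)) x (b0 ++ b1 ++ b2)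
            = b0 ++ b1 ++ (b2 ++ [x]) := by
          rw [PySem.List.insertBy_of_forall_not_before _ x (b0 ++ b1 ++ b2)
                (fun y hy => by
                  simp only [List.mem_append] at hy
                  rcases hy with (hy | hy) | hy
                  · simp [hr, h0 y hy]
                  · simp [hr, h1 y hy]
                  · simp [hr, h2 y hy])]
          simp
        rw [List.foldl_cons, step,
            ih b0 b1 (b2 ++ [x]) h0 h1
              (fun l hl => by rcases List.mem_append.mp hl with hl | hl
                              · exact h2 l hl
                              · simp at hl; subst hl; exact hr)]
        simp [pvF0, pvF1, pvF2, hx0, hx1]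

-- sorted(lines, key=rank) is exactly the three buckets concatenated
theorem pvSortedBuckets (lines : List String) :
    PySem.List.sorted lines pvRank
    = lines.filter pvF0 ++ lines.filter pvF1 ++ lines.filter pvF2 := by
  have := pvBucketFold lines [] [] [] (by simp) (by simp) (by simp)
  simpa [PySem.List.sorted] using this

-- A's pair-building loop is the same two filters
theorem pvPairFold (lines h d : List String) :
    lines.foldl
      (fun (acc : List String × List String) line =>
        if pvIsHeader line then (acc.1 ++ [line], acc.2) else (acc.1, acc.2 ++ [line]))
      (h, d)
    = (h ++ lines.filter pvIsHeader, d ++ lines.filter (fun l => !pvIsHeader l)) := by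
  induction lines generalizing h d with
  | nil => simp
  | cons x xs ih => by_cases hx : pvIsHeader x <;> simp [hx, ih]

-- the rank-2 count of the sorted list is the length of the context bucket
theorem pvCountCtx (lines : List String) :
    (lines.filter pvF0 ++ lines.filter pvF1 ++ lines.filter pvF2).countP
      (fun l => pvRank l == 2)
    = (lines.filter pvF2).length := by
  rw [List.countP_append, List.countP_append]
  have c0 : (lines.filter pvF0).countP (fun l => pvRank l == 2) = 0 := by
    rw [List.countP_eq_zero]
    intro l hl
    have := List.of_mem_filter hl
    simp [pvF0] at this
    simp [pvRank, this]
  have c1 : (lines.filter pvF1).countP (fun l => pvRank l == 2) = 0 := by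
    rw [List.countP_eq_zero]
    intro l hl
    have := List.of_mem_filter hl
    simp [pvF1] at this
    simp [pvRank, this.1, this.2]
  have c2 : (lines.filter pvF2).countP (fun l => pvRank l == 2) = (lines.filter pvF2).length := by
    rw [List.countP_eq_length]
    intro l hl
    have := List.of_mem_filter hl
    simp [pvF2] at this
    simp [pvRank, this.1, this.2]
  omega

-- (-mc)//2 = -(mc - mc//2): A's tail-slice start equals B's
theorem pvNegHalf (mc : Int) :
    PySem.Int.floordiv (-mc) 2 = -(mc - PySem.Int.floordiv mc 2) := by
  rw [PySem.Int.floordiv_eq_ediv_of_pos (a := -mc) (by norm_num),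
      PySem.Int.floordiv_eq_ediv_of_pos (a := mc) (by norm_num)]
  omega

-- ===== VERDICT (by name: the statement is the Claim_ definition above) =====
theorem optimize_diff_context_spec : Claim_equal_optimize_diff_context := by
  intro diff_text max_tokens _
  unfold Spec_optimize_diff_context optimize_diff_context optimize_diff_context_alt
  simp only [pvPairFold, pvSortedBuckets, pvCountCtx, List.nil_append]
  split_ifs
  · rfl
  · set lines := (PySem.Str.split? diff_text "\n").getD [] with hlines
    set H := lines.filter pvF0 with hH
    set E := lines.filter pvF1 with hE
    set C := lines.filter pvF2 with hC
    have hHdr : lines.filter (fun l => pvIsHeader l) = H := by rfl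
    have hEss : (lines.filter (fun l => !pvIsHeader l)).filter (fun l => pvIsSign l) = E := by
      rw [List.filter_filter, hE]
      exact List.filter_congr (fun a _ => by by_cases h : pvIsHeader a <;> simp [pvF1, h])
    have hCtx : (lines.filter (fun l => !pvIsHeader l)).filter (fun l => !pvIsSign l) = C := by
      rw [List.filter_filter, hC]
      exact List.filter_congr (fun a _ => by by_cases h : pvIsHeader a <;> simp [pvF2, h])
    have hlen : ((H ++ E ++ C).length : Int) - (C.length : Int) = (((H ++ E).length : Nat) : Int) := by
      simp; omega
    rw [hHdr, hEss, hCtx, hlen, PySem.List.slice_to_natCast, PySem.List.slice_from_natCast,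
        List.take_left, List.drop_left, pvNegHalf]
    simp [List.append_assoc]
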